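-- pv_equiv track=rewrite | github.com/AD9000/AdventOfCode | python/Day5/part2.py | getColVal
-- ===== SOURCE A (Python) =====
-- def getColVal(p):
--     l, r = 0, 8
--     for i in range(7, 10):
--         mid = (l + r) // 2
--         if p[i] == "L":
--             r = mid
--         else:
--             l = mid
--
--     return l
-- ===== SOURCE B (Python) =====
-- def getColVal(p):
--     bit = lambda c: 0 if c == "L" else 1
--     return bit(p[7]) * 4 + bit(p[8]) * 2 + bit(p[9])
-- ===== Notes on version B (the rewrite author's own statement) =====
-- stated objective: simpler
-- what changed: Replaces the interval-narrowing binary partition (l/r bounds with midpoint updates over range(7,10)) by a closed-form 3-bit positional decode of p[7],p[8],p[9].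
import Mathlib
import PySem

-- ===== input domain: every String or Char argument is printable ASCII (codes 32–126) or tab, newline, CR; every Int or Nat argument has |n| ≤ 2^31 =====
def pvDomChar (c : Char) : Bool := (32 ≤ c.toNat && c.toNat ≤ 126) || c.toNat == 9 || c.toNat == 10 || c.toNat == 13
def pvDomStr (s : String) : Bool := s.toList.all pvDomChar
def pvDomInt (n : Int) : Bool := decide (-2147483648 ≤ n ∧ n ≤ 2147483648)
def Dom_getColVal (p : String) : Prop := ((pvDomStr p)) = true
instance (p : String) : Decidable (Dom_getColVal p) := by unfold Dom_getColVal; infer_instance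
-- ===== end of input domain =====

-- B replaces A's interval-narrowing midpoint loop by a closed-form 3-bit decode of p[7],p[8],p[9] (simpler; same O(1) cost).

-- ===== PORT A =====
-- A loops i over range(7,10), keeping bounds (l, r) and narrowing by the midpoint; indexing is exact
-- via PySem.Str.pyGet? (getD only reachable outside Pre_getColVal, where Python raises IndexError).
def getColVal (p : String) : Int :=
  (((PySem.List.pyRange 7 10 1).foldl
    (fun (lr : Int × Int) (i : Int) =>
      let mid := PySem.Int.floordiv (lr.1 + lr.2) 2
      if (PySem.Str.pyGet? p i).getD '?' = 'L' then (lr.1, mid) else (mid, lr.2))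
    (0, 8))).1

-- ===== PORT B =====
def getColVal_alt (p : String) : Int :=
  let bit := fun (c : Char) => if c = 'L' then (0 : Int) else 1
  bit ((PySem.Str.pyGet? p 7).getD '?') * 4
    + bit ((PySem.Str.pyGet? p 8).getD '?') * 2
    + bit ((PySem.Str.pyGet? p 9).getD '?')

-- ===== PRECONDITION & SPEC =====
-- Pre_: A raises IndexError when len(p) < 10 (it reads p[7], p[8], p[9]); B raises there too.
def Pre_getColVal (p : String) : Prop := 10 ≤ p.toList.length
instance (p : String) : Decidable (Pre_getColVal p) := by unfold Pre_getColVal; infer_instance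
def pvWitness_getColVal : String := "FBFBBFFRLR"
def Spec_getColVal (p : String) (out : Int) : Prop := out = getColVal_alt p
instance (p : String) (out : Int) : Decidable (Spec_getColVal p out) := by unfold Spec_getColVal; infer_instance

-- ===== CLAIM (what is proved, stated in full; the proofs are below) =====
def Claim_equal_getColVal : Prop := ∀ (p : String), Dom_getColVal p → Pre_getColVal p → Spec_getColVal p (getColVal p)

-- ===== LEMMAS AND PROOFS =====
theorem getColVal_eq_of_chars (c7 c8 c9 : Char)
    (p : String) (h7 : PySem.Str.pyGet? p 7 = some c7)
    (h8 : PySem.Str.pyGet? p 8 = some c8) (h9 : PySem.Str.pyGet? p 9 = some c9) :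
    getColVal p = getColVal_alt p := by
  unfold getColVal getColVal_alt
  have hr : PySem.List.pyRange 7 10 1 = [7, 8, 9] := by decide
  rw [hr]
  simp only [List.foldl, h7, h8, h9, Option.getD_some]
  by_cases e7 : c7 = 'L' <;> by_cases e8 : c8 = 'L' <;> by_cases e9 : c9 = 'L' <;>
    simp [e7, e8, e9]

-- ===== VERDICT (by name: the statement is the Claim_ definition above) =====
theorem getColVal_spec : Claim_equal_getColVal := by
  intro p _ hpre
  unfold Pre_getColVal at hpre
  have g : ∀ n : Nat, n < 10 → ∃ c, PySem.Str.pyGet? p (n : Int) = some c := by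
    intro n hn
    have : n < p.toList.length := by omega
    exact ⟨p.toList[n], by simp [List.getElem?_eq_getElem this]⟩
  obtain ⟨c7, h7⟩ := g 7 (by omega)
  obtain ⟨c8, h8⟩ := g 8 (by omega)
  obtain ⟨c9, h9⟩ := g 9 (by omega)
  unfold Spec_getColVal
  exact getColVal_eq_of_chars c7 c8 c9 p (by exact_mod_cast h7) (by exact_mod_cast h8)
    (by exact_mod_cast h9)
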